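-- pv_equiv track=rewrite | github.com/Chrisaor/StudyPython | GeeksforGeeks/Practice/3. Easy/12.TransformTheArray.py | transform_the_array
-- ===== SOURCE A (Python) =====
-- def transform_the_array(arr):
--     rm_zero = list()
--     trans_arr = list()
--     zeros = 0
--     for i in arr:
--         if i == 0:
--             zeros += 1
--         else:
--             rm_zero.append(i)
--
--     for i in range(len(rm_zero)):
--         if i == 0:
--             trans_arr.append(rm_zero[0])
--         elif rm_zero[i] == trans_arr[-1]:
--             trans_arr[-1] = trans_arr[-1]*2
--             zeros += 1
--         else:
--             trans_arr.append(rm_zero[i])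
--
--     answer = trans_arr + [0]*zeros
--     return ' '.join(map(str, answer))
-- ===== SOURCE B (Python) =====
-- def transform_the_array(arr):
--     out = []
--     pending = None  # current merged value not yet emitted
--     for x in arr:
--         if x == 0:
--             continue
--         if pending is None:
--             pending = x
--         elif x == pending:
--             pending *= 2
--         else:
--             out.append(pending)
--             pending = x
--     if pending is not None:
--         out.append(pending)
--     out.extend([0] * (len(arr) - len(out)))
--     return ' '.join(map(str, out))
-- ===== Notes on version B (the rewrite author's own statement) =====
-- stated objective: simpler
-- what changed: Replaced A's two staged list-building passes (zero filter with a zeros counter, then an index loop that merges by mutating the result's last element and incrementing the counter) by a single streaming pass with a pending-carry variable that is doubled on repeats and emitted only when the value changes, the zero padding being recovered from the length invariant len(arr) - len(out).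
import Mathlib
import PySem

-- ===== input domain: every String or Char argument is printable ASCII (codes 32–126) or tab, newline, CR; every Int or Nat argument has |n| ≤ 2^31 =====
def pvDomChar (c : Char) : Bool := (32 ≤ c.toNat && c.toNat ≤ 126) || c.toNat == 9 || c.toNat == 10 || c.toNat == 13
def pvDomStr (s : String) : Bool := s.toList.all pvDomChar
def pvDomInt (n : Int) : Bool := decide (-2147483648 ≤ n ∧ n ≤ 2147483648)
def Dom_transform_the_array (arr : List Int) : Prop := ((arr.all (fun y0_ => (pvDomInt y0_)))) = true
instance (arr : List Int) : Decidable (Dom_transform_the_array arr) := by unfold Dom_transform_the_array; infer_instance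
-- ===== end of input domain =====

-- B replaces A's two staged list-building passes (zero filter + index loop mutating the result's
-- tail) by one streaming pass with a pending-carry variable, emitted only when the value changes;
-- the zero padding comes from the length invariant len(arr) - len(out); objective: simpler.

-- ===== PORT A =====
-- first loop: collect nonzeros, count zeros
def tA_step1 (st : List Int × Int) (i : Int) : List Int × Int :=
  if i == 0 then (st.1, st.2 + 1) else (st.1 ++ [i], st.2)

-- second loop body; all indices (0, i, -1) are in range whenever this is reached, so pyGetD/pySetD
-- with default 0 are exact for Python's rm_zero[0] / rm_zero[i] / trans_arr[-1]
def tA_step2 (rm : List Int) (st : List Int × Int) (i : Int) : List Int × Int :=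
  if i == 0 then (st.1 ++ [PySem.List.pyGetD rm 0 0], st.2)
  else if PySem.List.pyGetD rm i 0 == PySem.List.pyGetD st.1 (-1) 0 then
    (PySem.List.pySetD st.1 (-1) (PySem.List.pyGetD st.1 (-1) 0 * 2), st.2 + 1)
  else (st.1 ++ [PySem.List.pyGetD rm i 0], st.2)

def transform_the_array (arr : List Int) : String :=
  let s1 := arr.foldl tA_step1 ([], 0)
  let rm := s1.1
  let s2 := (PySem.List.pyRange 0 (rm.length : Int) 1).foldl (tA_step2 rm) ([], s1.2)
  -- zeros is always ≥ 0, so [0]*zeros is replicate zeros.toNat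
  let answer := s2.1 ++ List.replicate s2.2.toNat 0
  PySem.Str.join " " (answer.map PySem.Int.toStr)

-- ===== PORT B =====
-- loop body: skip zeros; pending carry is doubled on a repeat, emitted when the value changes
def tB_step (st : List Int × Option Int) (x : Int) : List Int × Option Int :=
  if x == 0 then st
  else match st.2 with
    | none => (st.1, some x)
    | some p => if x == p then (st.1, some (p * 2)) else (st.1 ++ [p], some x)

def transform_the_array_alt (arr : List Int) : String :=
  let st := arr.foldl tB_step ([], none)
  -- 'if pending is not None: out.append(pending)'
  let out := match st.2 with | none => st.1 | some p => st.1 ++ [p]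
  let res2 := out ++ List.replicate (arr.length - out.length) 0
  PySem.Str.join " " (res2.map PySem.Int.toStr)

-- ===== PRECONDITION & SPEC =====
def Spec_transform_the_array (arr : List Int) (out : String) : Prop := out = transform_the_array_alt arr
instance (arr : List Int) (out : String) : Decidable (Spec_transform_the_array arr out) := by unfold Spec_transform_the_array; infer_instance

-- ===== CLAIM (what is proved, stated in full; the proofs are below) =====
def Claim_equal_transform_the_array : Prop := ∀ (arr : List Int), Dom_transform_the_array arr → Spec_transform_the_array arr (transform_the_array arr)

-- ===== LEMMAS AND PROOFS =====

-- abstract merge step used only by the proofs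
def mstep (res : List Int) (x : Int) : List Int :=
  if res.getLast? = some x then res.dropLast ++ [x * 2] else res ++ [x]

-- finalize B's carry state (proof-only helper)
def bfin (st : List Int × Option Int) : List Int :=
  match st.2 with | none => st.1 | some p => st.1 ++ [p]

theorem mstep_ne_nil (res : List Int) (x : Int) : mstep res x ≠ [] := by
  unfold mstep; split <;> simp

theorem foldl_mstep_ne_nil (l : List Int) (a : List Int) (h : a ≠ [] ∨ l ≠ []) :
    l.foldl mstep a ≠ [] := by
  induction l generalizing a with
  | nil => simpa using h
  | cons x xs ih =>
    cases xs with
    | nil => simpa using mstep_ne_nil a x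
    | cons y ys => exact ih _ (Or.inr (by simp))

theorem length_mstep (res : List Int) (x : Int) :
    (mstep res x).length = res.length ∨ (mstep res x).length = res.length + 1 := by
  unfold mstep; split
  · left
    rename_i h
    have hne : res ≠ [] := by rintro rfl; simp at h
    have hpos : 0 < res.length := List.length_pos_of_ne_nil hne
    simp only [List.length_append, List.length_dropLast, List.length_cons, List.length_nil]
    omega
  · right; simp

theorem length_foldl_mstep_le (l : List Int) (a : List Int) :
    (l.foldl mstep a).length ≤ a.length + l.length := by
  induction l generalizing a with
  | nil => simp
  | cons x xs ih =>
    simp only [List.foldl_cons, List.length_cons]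
    have := ih (mstep a x)
    rcases length_mstep a x with h | h <;> omega

-- pySetD at -1 on a nonempty list replaces the last element
theorem pySetD_neg_one_concat (rs : List Int) (y v : Int) :
    PySem.List.pySetD (rs ++ [y]) (-1) v = rs ++ [v] := by
  simp [PySem.List.pySetD, PySem.List.pySet?, PySem.List.pyIdx?]

-- mstep against a tail that carries p: double on a repeat, append otherwise
theorem mstep_last_eq (out : List Int) (p : Int) :
    mstep (out ++ [p]) p = out ++ [p * 2] := by
  unfold mstep; rw [if_pos (by simp), List.dropLast_concat]

theorem mstep_last_ne (out : List Int) (p x : Int) (hxp : ¬ x = p) :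
    mstep (out ++ [p]) x = (out ++ [p]) ++ [x] := by
  have hlast : (out ++ [p]).getLast? = some p := by simp
  unfold mstep
  rw [if_neg (by rw [hlast]; exact fun h => hxp (Option.some.inj h).symm)]

-- B's step on a nonzero element, resolved against the carry
theorem tB_step_eq_carry (out : List Int) (p x : Int) (hx : ¬ (x == 0) = true) :
    tB_step (out, some p) x = if x = p then (out, some (p * 2)) else (out ++ [p], some x) := by
  simp [tB_step, hx]

theorem tB_step_zero (st : List Int × Option Int) : tB_step st 0 = st := by simp [tB_step]

-- the carry fold, finalized, is the mstep fold (nonzero elements)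
theorem foldl_tB_carry (l : List Int) (hl : ∀ x ∈ l, ¬ (x == 0) = true)
    (out : List Int) (p : Int) :
    bfin (l.foldl tB_step (out, some p)) = l.foldl mstep (out ++ [p]) := by
  induction l generalizing out p with
  | nil => rfl
  | cons x xs ih =>
    have hx := hl x (by simp)
    have hxs : ∀ y ∈ xs, ¬ (y == 0) = true := fun y hy => hl y (by simp [hy])
    simp only [List.foldl_cons]
    rw [tB_step_eq_carry out p x hx]
    by_cases hxp : x = p
    · subst hxp
      rw [if_pos rfl, ih hxs, mstep_last_eq]
    · rw [if_neg hxp, ih hxs, mstep_last_ne out p x hxp]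

theorem foldl_tB_from_nil (l : List Int) (hl : ∀ x ∈ l, ¬ (x == 0) = true) :
    bfin (l.foldl tB_step ([], none)) = l.foldl mstep [] := by
  cases l with
  | nil => rfl
  | cons x xs =>
    have hx := hl x (by simp)
    have hxs : ∀ y ∈ xs, ¬ (y == 0) = true := fun y hy => hl y (by simp [hy])
    simp only [List.foldl_cons]
    have h1 : tB_step ([], none) x = ([], some x) := by simp [tB_step, hx]
    have h2 : mstep [] x = [x] := by unfold mstep; simp
    rw [h1, h2]
    simpa using foldl_tB_carry xs hxs [] x

-- B's fold skips zeros: it equals the fold over the nonzero filter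
theorem foldl_tB_filter (arr : List Int) (st : List Int × Option Int) :
    arr.foldl tB_step st = (arr.filter (fun i => !(i == 0))).foldl tB_step st := by
  induction arr generalizing st with
  | nil => rfl
  | cons x xs ih =>
    by_cases hx : (x == 0) = true
    · have : x = 0 := by simpa using hx
      subst this
      simp [tB_step_zero, ih]
    · simp only [List.foldl_cons, List.filter_cons, hx, Bool.not_false, if_pos]
      exact ih _

-- A's first loop: filter + count
theorem foldl_tA1 (arr : List Int) (acc : List Int) (z : Int) :
    arr.foldl tA_step1 (acc, z) =
      (acc ++ arr.filter (fun i => !(i == 0)),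
       z + ((arr.length : Int) - ((arr.filter (fun i => !(i == 0))).length : Int))) := by
  induction arr generalizing acc z with
  | nil => simp
  | cons x xs ih =>
    by_cases hx : (x == 0) = true
    · have hfil : List.filter (fun i => !(i == 0)) (x :: xs) =
          List.filter (fun i => !(i == 0)) xs := by simp [hx]
      have hstep : tA_step1 (acc, z) x = (acc, z + 1) := by simp [tA_step1, hx]
      rw [List.foldl_cons, hstep, ih, hfil]
      refine Prod.ext rfl ?_
      simp only [List.length_cons]
      push_cast; ring
    · have hfil : List.filter (fun i => !(i == 0)) (x :: xs) =
          x :: List.filter (fun i => !(i == 0)) xs := by simp [hx]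
      have hstep : tA_step1 (acc, z) x = (acc ++ [x], z) := by simp [tA_step1, hx]
      rw [List.foldl_cons, hstep, ih, hfil]
      refine Prod.ext (by simp) ?_
      simp only [List.length_cons]
      push_cast; ring

-- indexing inside the second loop only looks left of the appended element
theorem tA_step2_congr (rs : List Int) (x : Int) (st : List Int × Int) (i : Int)
    (h0 : 0 ≤ i) (hn : i < (rs.length : Int)) :
    tA_step2 (rs ++ [x]) st i = tA_step2 rs st i := by
  have hget : ∀ j : Int, 0 ≤ j → j < (rs.length : Int) →
      PySem.List.pyGetD (rs ++ [x]) j 0 = PySem.List.pyGetD rs j 0 := by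
    intro j hj0 hjn
    rw [PySem.List.pyGetD_eq_getElem (rs ++ [x]) 0 hj0 (by simp; omega),
        PySem.List.pyGetD_eq_getElem rs 0 hj0 (by omega)]
    exact List.getElem_append_left (by omega)
  unfold tA_step2
  by_cases hi : (i == 0) = true
  · have : i = 0 := by simpa using hi
    subst this
    rw [hget 0 le_rfl hn]
  · rw [if_neg hi, if_neg hi, hget i h0 hn]

-- A's second loop computes the mstep-fold and books one extra zero per merge
theorem foldl_tA2 (rm : List Int) (z : Int) :
    (PySem.List.pyRange 0 (rm.length : Int) 1).foldl (tA_step2 rm) ([], z) =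
      (rm.foldl mstep [],
       z + ((rm.length : Int) - ((rm.foldl mstep []).length : Int))) := by
  induction rm using List.reverseRecOn with
  | nil => simp [PySem.List.pyRange_one_eq_nil]
  | append_singleton rs x ih =>
    have hsplit : PySem.List.pyRange 0 ((rs ++ [x]).length : Int) 1 =
        PySem.List.pyRange 0 (rs.length : Int) 1 ++ [(rs.length : Int)] := by
      have : ((rs ++ [x]).length : Int) = (rs.length : Int) + 1 := by simp
      rw [this, PySem.List.pyRange_one_succ_right (by positivity)]
    have hcongr : (PySem.List.pyRange 0 (rs.length : Int) 1).foldl (tA_step2 (rs ++ [x])) ([], z) =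
        (PySem.List.pyRange 0 (rs.length : Int) 1).foldl (tA_step2 rs) ([], z) := by
      apply PySem.List.foldl_congr_mem
      intro acc i hi
      rw [PySem.List.mem_pyRange_one] at hi
      exact tA_step2_congr rs x acc i hi.1 hi.2
    rw [hsplit, List.foldl_append, hcongr, ih, List.foldl_append]
    simp only [List.foldl_cons, List.foldl_nil]
    -- last step of the loop: index rs.length picks x
    have hgetx : PySem.List.pyGetD (rs ++ [x]) (rs.length : Int) 0 = x := by
      rw [PySem.List.pyGetD_natCast]
      simp
    rcases eq_or_ne rs ([] : List Int) with rfl | hrsne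
    · -- first iteration: i == 0, unconditional append
      simp [tA_step2, mstep, PySem.List.pyGetD_zero_cons]
    · -- i = rs.length ≠ 0
      have hne : ¬ ((rs.length : Int) == 0) = true := by
        simpa [List.length_eq_zero_iff] using hrsne
      have hMne : rs.foldl mstep [] ≠ [] := foldl_mstep_ne_nil _ _ (Or.inr hrsne)
      obtain ⟨ms, m, hMs⟩ := (List.eq_nil_or_concat (rs.foldl mstep [])).resolve_left hMne
      rw [List.concat_eq_append] at hMs
      have hlastD : PySem.List.pyGetD (ms ++ [m]) (-1) 0 = m :=
        PySem.List.pyGetD_neg_one_append_singleton ms m 0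
      have hlast? : (ms ++ [m]).getLast? = some m := by simp
      rw [hMs]
      by_cases hxm : x = m
      · subst hxm
        have hstepA : ∀ w : Int, tA_step2 (rs ++ [x]) (ms ++ [x], w) (rs.length : Int)
            = (ms ++ [x * 2], w + 1) := by
          intro w
          unfold tA_step2
          rw [if_neg hne, hgetx, hlastD, if_pos (by simp), pySetD_neg_one_concat]
        have hstepB : mstep (ms ++ [x]) x = ms ++ [x * 2] := by
          unfold mstep
          rw [if_pos hlast?, List.dropLast_concat]
        rw [hstepA, hstepB]
        refine Prod.ext rfl ?_
        simp only [List.length_append, List.length_cons, List.length_nil]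
        push_cast; ring
      · have hstepA : ∀ w : Int, tA_step2 (rs ++ [x]) (ms ++ [m], w) (rs.length : Int)
            = (ms ++ [m] ++ [x], w) := by
          intro w
          unfold tA_step2
          rw [if_neg hne, hgetx, hlastD, if_neg (by simpa using hxm)]
        have hstepB : mstep (ms ++ [m]) x = ms ++ [m] ++ [x] := by
          unfold mstep
          rw [if_neg (by simp [hlast?]; omega)]
        rw [hstepA, hstepB]
        refine Prod.ext rfl ?_
        simp only [List.length_append, List.length_cons, List.length_nil]
        push_cast; ring

-- ===== VERDICT (by name: the statement is the Claim_ definition above) =====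
theorem transform_the_array_spec : Claim_equal_transform_the_array := by
  intro arr _
  unfold Spec_transform_the_array transform_the_array transform_the_array_alt
  simp only [foldl_tA1, List.nil_append, foldl_tA2]
  rw [foldl_tB_filter arr ([], none)]
  set F := arr.filter (fun i => !(i == 0)) with hF
  have hFnz : ∀ x ∈ F, ¬ (x == 0) = true := by
    intro x hx
    have := List.of_mem_filter hx
    simpa using this
  have hfin : bfin (F.foldl tB_step ([], none)) = F.foldl mstep [] :=
    foldl_tB_from_nil F hFnz
  set M := F.foldl mstep [] with hM
  have hF_le : F.length ≤ arr.length := List.length_filter_le _ _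
  have hM_le : M.length ≤ F.length := by
    have := length_foldl_mstep_le F []
    simpa using this
  have hz : (0 + ((arr.length : Int) - (F.length : Int)) +
      ((F.length : Int) - (M.length : Int))).toNat = arr.length - M.length := by
    omega
  rw [hz]
  -- the match expression in the alt is bfin of the fold
  show PySem.Str.join " " ((M ++ List.replicate (arr.length - M.length) 0).map PySem.Int.toStr)
      = PySem.Str.join " " (((bfin (F.foldl tB_step ([], none))) ++
          List.replicate (arr.length - (bfin (F.foldl tB_step ([], none))).length) 0).map PySem.Int.toStr)
  rw [hfin]
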